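-- pv_equiv track=rewrite | github.com/yolomeus/advent-of-code | 2025/day_06.py | part2
-- ===== SOURCE A (Python) =====
-- from functools import reduce
--
-- operations = {
--     "*": lambda a, b: a * b,
--     "+": lambda a, b: a + b,
--     "-": lambda a, b: a - b,
-- }
--
-- def _rpad(line: list[str], length: int) -> list[str]:
--     return line + [" "] * (length - len(line))
--
-- def part2(homework_lines_raw: tuple[str, ...]) -> int:
--     homework_lines = list(map(lambda x: list(x.replace("\n", " ")), homework_lines_raw))
--
--     # make sure all lines have the same length
--     max_len = max(len(line) for line in homework_lines)
--     *homework_lines, op_symbols = [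
--         list(reversed(_rpad(line, max_len))) for line in homework_lines
--     ]
--
--     total = 0
--     current_operands = []
--     j = 0
--     while j < len(homework_lines[0]):
--         current_operand = ""
--         for i in range(len(homework_lines)):
--             current_symbol = homework_lines[i][j]
--             if current_symbol.isdigit():
--                 current_operand += current_symbol
--
--         if current_operand:
--             current_operands.append(int(current_operand))
--
--         if op_symbols[j] != " ":
--             total += reduce(operations[op_symbols[j]], current_operands)
--             current_operands = []
--
--         j += 1
--
--     return total
-- ===== SOURCE B (Python) =====
-- operations = {
--     "*": lambda a, b: a * b,
--     "+": lambda a, b: a + b,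
--     "-": lambda a, b: a - b,
-- }
--
-- def part2(homework_lines_raw):
--     rows = [s.replace("\n", " ") for s in homework_lines_raw]
--     width = max(map(len, rows))
--     grid = [r.ljust(width)[::-1] for r in rows]
--     data, op_row = grid[:-1], grid[-1]
--     # one (operand-digits, operator-symbol) record per column
--     cols = [("".join(ch for ch in col if ch.isdigit()), op)
--             for col, op in zip(zip(*data), op_row)]
--     total = 0
--     while any(op != " " for _, op in cols):
--         k = next(i for i, (_, op) in enumerate(cols) if op != " ")
--         sym = cols[k][1]
--         operands = [int(d) for d, _ in cols[:k + 1] if d]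
--         acc = operands[0]
--         for v in operands[1:]:
--             acc = operations[sym](acc, v)
--         total += acc
--         cols = cols[k + 1:]
--     return total
-- ===== Notes on version B (the rewrite author's own statement) =====
-- stated objective: alternative
-- what changed: Replaces A's single while loop with mutable segment state by a declarative pipeline: transpose the padded grid into per-column (digit-string, operator) records, then repeatedly split off the prefix up to the first operator column and fold each group's operands with that operator.
import Mathlib
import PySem

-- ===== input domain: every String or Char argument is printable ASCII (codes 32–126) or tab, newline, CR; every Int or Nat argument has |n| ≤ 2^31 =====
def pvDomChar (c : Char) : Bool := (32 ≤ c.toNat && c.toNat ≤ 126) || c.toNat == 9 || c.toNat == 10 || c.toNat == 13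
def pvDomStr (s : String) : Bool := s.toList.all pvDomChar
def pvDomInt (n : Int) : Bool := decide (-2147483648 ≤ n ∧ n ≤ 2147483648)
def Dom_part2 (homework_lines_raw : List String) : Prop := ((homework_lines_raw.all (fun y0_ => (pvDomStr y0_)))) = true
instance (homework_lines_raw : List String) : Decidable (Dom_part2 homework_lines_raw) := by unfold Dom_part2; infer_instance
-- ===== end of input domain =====

-- B replaces A's single stateful while loop by a per-column-records pipeline that repeatedly
-- splits off the group up to the first operator column and folds it; same cost, different decomposition.

-- shared module context of both programs: the `operations` dict, applied under Pre_ only to '*','+','-'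
def pvApplyOp (sym : Char) (a b : Int) : Int :=
  if sym = '*' then a * b else if sym = '+' then a + b else a - b

-- int(s) for a string of ASCII digits (exact there; both programs call int only on nonempty digit strings)
def pvDigitsToInt (l : List Char) : Int :=
  l.foldl (fun n c => n * 10 + ((c.toNat : Int) - 48)) 0

-- ===== PORT A =====
-- functools.reduce(operations[sym], xs): Python raises TypeError on [], which Pre_ excludes; 0 is a junk value there
def pvReduceA (sym : Char) : List Int → Int
  | [] => 0
  | a :: r => r.foldl (fun x y => pvApplyOp sym x y) a

def part2 (homework_lines_raw : List String) : Int :=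
  -- list(map(lambda x: list(x.replace("\n", " ")), homework_lines_raw))
  let homework_lines := homework_lines_raw.map (fun s => s.toList.map (fun c => if c = '\n' then ' ' else c))
  -- max(len(line) for line in homework_lines); Python raises ValueError on empty input, excluded by Pre_
  let max_len := (homework_lines.map List.length).foldl Nat.max 0
  -- [list(reversed(_rpad(line, max_len))) for line in homework_lines]; *homework_lines, op_symbols = …
  let grid := homework_lines.map (fun l => (l ++ List.replicate (max_len - l.length) ' ').reverse)
  let data := grid.dropLast
  let op_symbols := grid.getLastD []   -- unpacking raises on empty input, excluded by Pre_
  -- while j < len(homework_lines[0]), state (total, current_operands); len(data[0]) raises if data==[], excluded by Pre_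
  ((List.range (data.headD []).length).foldl (fun (st : Int × List Int) j =>
      let current_operand := data.foldl (fun acc row =>
          let current_symbol := row.getD j ' '
          if current_symbol.isDigit then acc ++ [current_symbol] else acc) []
      let cur := if current_operand ≠ [] then st.2 ++ [pvDigitsToInt current_operand] else st.2
      if op_symbols.getD j ' ' ≠ ' ' then (st.1 + pvReduceA (op_symbols.getD j ' ') cur, [])
      else (st.1, cur)) ((0 : Int), ([] : List Int))).1

-- ===== PORT B =====
-- the while loop of Source B: find the first operator column, fold that group's operands, recurse on the rest
def pvGrp (cols : List (List Char × Char)) : Int :=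
  match h : cols.findIdx? (fun p => p.2 ≠ ' ') with
  | none => 0
  | some k =>
    let sym := (cols.getD k ([], ' ')).2
    let operands := (cols.take (k + 1)).filterMap (fun p => if p.1 = [] then none else some (pvDigitsToInt p.1))
    (match operands with
     | [] => 0        -- operands[0] raises IndexError in Python; excluded by Pre_
     | a :: r => r.foldl (fun x y => pvApplyOp sym x y) a) + pvGrp (cols.drop (k + 1))
termination_by cols.length
decreasing_by
  have := List.findIdx?_eq_some_iff_findIdx_eq.mp h
  simp only [List.length_drop]; omega

def part2_alt (homework_lines_raw : List String) : Int :=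
  let rows := homework_lines_raw.map (fun s => s.toList.map (fun c => if c = '\n' then ' ' else c))
  let width := (rows.map List.length).foldl Nat.max 0   -- max(map(len, rows)); raises on empty input, excluded by Pre_
  let grid := rows.map (fun r => (r ++ List.replicate (width - r.length) ' ').reverse)  -- r.ljust(width)[::-1]
  let data := grid.dropLast
  let op_row := grid.getLastD []
  -- cols = [(joined digits of col, op) for col, op in zip(zip(*data), op_row)]; zip(*data) is [] when data == [],
  -- otherwise it is the list of the `width` columns (every padded row has length `width`)
  let cols := if data = [] then []
    else (((List.range width).map (fun j => data.map (fun r => r.getD j ' '))).zip op_row).map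
      (fun p => (p.1.filter Char.isDigit, p.2))
  pvGrp cols

-- ===== PRECONDITION & SPEC =====
-- Pre_ admits exactly the inputs on which Python A returns: at least two lines, every non-space
-- character of the operator row is one of * + -, and each operator column's segment (digit columns
-- since the previous operator column, inclusive) is nonempty — elsewhere A raises ValueError or
-- IndexError (fewer than two lines), KeyError (unknown operator), or TypeError (reduce of []).
def Pre_part2 (homework_lines_raw : List String) : Prop :=
  (let rows := homework_lines_raw.map (fun s => s.toList.map (fun c => if c = '\n' then ' ' else c))
   let w := (rows.map List.length).foldl Nat.max 0
   let grid := rows.map (fun r => (r ++ List.replicate (w - r.length) ' ').reverse)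
   let data := grid.dropLast
   let ops := grid.getLastD []
   decide (2 ≤ homework_lines_raw.length) &&
   (List.range w).all (fun j =>
     let s := ops.getD j ' '
     (s == ' ') ||
       ((s == '*' || s == '+' || s == '-') &&
        (List.range (j + 1)).any (fun k =>
           data.any (fun r => (r.getD k ' ').isDigit) &&
           (List.range j).all (fun m => !(decide (k ≤ m)) || (ops.getD m ' ' == ' '))))) ) = true
instance (homework_lines_raw : List String) : Decidable (Pre_part2 homework_lines_raw) := by unfold Pre_part2; infer_instance

def pvWitness_part2 : List String := ["12 3", " 4 5", "+  *"]

def Spec_part2 (homework_lines_raw : List String) (out : Int) : Prop := out = part2_alt homework_lines_raw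
instance (homework_lines_raw : List String) (out : Int) : Decidable (Spec_part2 homework_lines_raw out) := by unfold Spec_part2; infer_instance

-- ===== CLAIM (what is proved, stated in full; the proofs are below) =====
def Claim_equal_part2 : Prop := ∀ (homework_lines_raw : List String), Dom_part2 homework_lines_raw → Pre_part2 homework_lines_raw → Spec_part2 homework_lines_raw (part2 homework_lines_raw)

-- ===== LEMMAS AND PROOFS =====

-- A's loop body, as a function of one column record
def pvStep (st : Int × List Int) (c : List Char × Char) : Int × List Int :=
  let cur := if c.1 ≠ [] then st.2 ++ [pvDigitsToInt c.1] else st.2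
  if c.2 ≠ ' ' then (st.1 + pvReduceA c.2 cur, []) else (st.1, cur)

-- segment-accumulating recursion both ports are proved equal to
def pvSeg : List Int → List (List Char × Char) → Int
  | _, [] => 0
  | cur, c :: rest =>
    let cur' := if c.1 ≠ [] then cur ++ [pvDigitsToInt c.1] else cur
    if c.2 ≠ ' ' then pvReduceA c.2 cur' + pvSeg [] rest else pvSeg cur' rest

theorem foldl_step_eq_seg (cols : List (List Char × Char)) :
    ∀ (total : Int) (cur : List Int),
      (cols.foldl pvStep (total, cur)).1 = total + pvSeg cur cols := by
  induction cols with
  | nil => intro total cur; simp [pvSeg]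
  | cons c rest ih =>
    intro total cur
    simp only [List.foldl_cons, pvSeg, pvStep]
    by_cases h2 : c.2 = ' '
    · simp [h2, ih]
    · simp [h2, ih]; ring

theorem seg_split (cols : List (List Char × Char)) :
    ∀ (cur : List Int),
      pvSeg cur cols =
        match cols.findIdx? (fun p => p.2 ≠ ' ') with
        | none => 0
        | some k =>
            pvReduceA (cols.getD k ([], ' ')).2
              (cur ++ (cols.take (k + 1)).filterMap (fun p => if p.1 = [] then none else some (pvDigitsToInt p.1)))
            + pvSeg [] (cols.drop (k + 1)) := by
  induction cols with
  | nil => intro cur; simp [pvSeg]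
  | cons c rest ih =>
    intro cur
    by_cases h2 : c.2 = ' '
    · have hidx : (c :: rest).findIdx? (fun p => p.2 ≠ ' ') =
          (rest.findIdx? (fun p => p.2 ≠ ' ')).map (· + 1) := by
        simp [List.findIdx?_cons, h2]
      have hstep : pvSeg cur (c :: rest) = pvSeg (cur ++ (if c.1 = [] then [] else [pvDigitsToInt c.1])) rest := by
        by_cases h1 : c.1 = [] <;> simp [pvSeg, h2, h1]
      rw [hidx, hstep, ih]
      cases hfi : rest.findIdx? (fun p => p.2 ≠ ' ') with
      | none => simp
      | some k =>
        simp only [Option.map_some]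
        have htake : (c :: rest).take (k + 1 + 1) = c :: rest.take (k + 1) := rfl
        have hdrop : (c :: rest).drop (k + 1 + 1) = rest.drop (k + 1) := rfl
        rw [htake, hdrop]
        simp only [List.getD_cons_succ, List.filterMap_cons]
        by_cases h1 : c.1 = [] <;> simp [h1, List.append_assoc]
    · have hidx : (c :: rest).findIdx? (fun p => p.2 ≠ ' ') = some 0 := by
        simp [List.findIdx?_cons, h2]
      rw [hidx]
      simp only [List.getD_cons_zero, List.take_succ_cons, List.take_zero, List.drop_succ_cons,
        List.drop_zero, List.filterMap_cons, List.filterMap_nil]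
      by_cases h1 : c.1 = [] <;> simp [pvSeg, h2, h1]

theorem grp_eq_seg (cols : List (List Char × Char)) : pvGrp cols = pvSeg [] cols := by
  rw [pvGrp, seg_split]
  cases hfi : cols.findIdx? (fun p => p.2 ≠ ' ') with
  | none => rfl
  | some k =>
    have hrec : pvGrp (cols.drop (k + 1)) = pvSeg [] (cols.drop (k + 1)) := by
      have := List.findIdx?_eq_some_iff_findIdx_eq.mp hfi
      exact grp_eq_seg (cols.drop (k + 1))
    simp only [hrec, pvReduceA, List.nil_append]
termination_by cols.length
decreasing_by
  have := List.findIdx?_eq_some_iff_findIdx_eq.mp hfi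
  simp only [List.length_drop]; omega

-- the two ports agree on EVERY input (the claim only needs it on Pre_)
theorem ports_eq (raw : List String) : part2 raw = part2_alt raw := by
  unfold part2 part2_alt
  simp only []
  set rows := raw.map (fun s => s.toList.map (fun c => if c = '\n' then ' ' else c)) with hrows
  set w := (rows.map List.length).foldl Nat.max 0 with hw
  set grid := rows.map (fun r => (r ++ List.replicate (w - r.length) ' ').reverse) with hgrid
  set data := grid.dropLast with hdata
  set ops := grid.getLastD [] with hops
  by_cases hd : data = []
  · rw [hd]
    simp [pvGrp]
  · rw [if_neg hd]
    -- every row of grid has length w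
    have hrowlen : ∀ r ∈ grid, r.length = w := by
      intro r hr
      rcases List.mem_map.mp hr with ⟨l, hl, rfl⟩
      have hle : l.length ≤ w := by
        have hmem : l.length ∈ rows.map List.length := List.mem_map_of_mem hl
        exact (PySem.List.le_foldl_max (rows.map List.length) 0).2 _ hmem
      simp [Nat.sub_add_cancel, hle]
    -- A's loop bound is w
    have hwidth : (data.headD []).length = w := by
      cases hdl : data with
      | nil => exact absurd hdl hd
      | cons r rest =>
        exact hrowlen r (List.mem_of_mem_dropLast (by rw [← hdata, hdl]; exact List.mem_cons_self))
    -- ops has length w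
    have hgne : grid ≠ [] := fun h => hd (by rw [hdata, h]; rfl)
    have hopsmem : ops ∈ grid := by
      rw [hops, List.getLastD_eq_getLast?, List.getLast?_eq_some_getLast hgne]
      exact List.getLast_mem hgne
    have hopslen : ops.length = w := hrowlen _ hopsmem
    -- B's cols list is the list of per-column records
    have hcols :
        (((List.range w).map (fun j => data.map (fun r => r.getD j ' '))).zip ops).map
            (fun p => (p.1.filter Char.isDigit, p.2)) =
          (List.range w).map (fun j =>
            ((data.map (fun r => r.getD j ' ')).filter Char.isDigit, ops.getD j ' ')) := by
      apply List.ext_getElem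
      · simp [hopslen]
      · intro j h1 h2
        have hjw : j < w := by simpa using h2
        have hsome : ops[j]? = some (ops[j]'(by omega)) := List.getElem?_eq_getElem (by omega)
        simp [List.getElem_zip, List.getD_eq_getElem?_getD, hsome]
    rw [hcols, hwidth, grp_eq_seg]
    have hB : pvSeg []
        ((List.range w).map (fun j =>
          ((data.map (fun r => r.getD j ' ')).filter Char.isDigit, ops.getD j ' '))) =
        ((((List.range w).map (fun j =>
          ((data.map (fun r => r.getD j ' ')).filter Char.isDigit, ops.getD j ' '))).foldl pvStep
            ((0 : Int), ([] : List Int))).1) := by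
      rw [foldl_step_eq_seg]; ring
    rw [hB, List.foldl_map]
    congr 1
    apply PySem.List.foldl_congr_mem
    intro st j hj
    rw [PySem.List.foldl_append_if (l := data) (p := fun row => (row.getD j ' ').isDigit)
      (f := fun row => row.getD j ' ') (acc := [])]
    simp [pvStep, List.filter_map, Function.comp_def]

-- ===== VERDICT (by name: the statement is the Claim_ definition above) =====
theorem part2_spec : Claim_equal_part2 := by
  intro raw _ _
  unfold Spec_part2
  exact ports_eq raw
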